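-- pv_equiv track=rewrite | github.com/wired32/ascii-player | src/utils/file/tools.py | unpack_high
-- ===== SOURCE A (Python) =====
-- BRIGHTNESS_LEVELS_HIGH = "          .-':_,^=;><+!rc*/z?sLTv)J7(|F{C}fI31tlu[neoZ5Yxya]2ESwqkP6h9d4VpOGbUAKXHm8RD#$Bg0MNWQ%&@██████████████\n"
--
-- def unpack_high(packed_bytes):
--     bit_buffer = 0
--     bit_count = 0
--     result = []
--
--     for byte in packed_bytes:
--         bit_buffer = (bit_buffer << 8) | byte
--         bit_count += 8
--
--         while bit_count >= 7:
--             bit_count -= 7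
--             value = (bit_buffer >> bit_count) & 0x7F
--             if value < len(BRIGHTNESS_LEVELS_HIGH):
--                 result.append(BRIGHTNESS_LEVELS_HIGH[value])
--
--     return ''.join(result)
-- ===== SOURCE B (Python) =====
-- BRIGHTNESS_LEVELS_HIGH = "          .-':_,^=;><+!rc*/z?sLTv)J7(|F{C}fI31tlu[neoZ5Yxya]2ESwqkP6h9d4VpOGbUAKXHm8RD#$Bg0MNWQ%&@██████████████\n"
--
-- def unpack_high(packed_bytes):
--     # Each byte completes exactly one 7-bit group (plus a second one on every
--     # seventh byte), so the drain loop resolves to arithmetic on the byte index.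
--     buf = 0
--     result = []
--     for i, byte in enumerate(packed_bytes):
--         buf = (buf << 8) | byte
--         pending = i % 7  # bits carried over from previous bytes
--         value = (buf >> (pending + 1)) & 0x7F
--         if value < len(BRIGHTNESS_LEVELS_HIGH):
--             result.append(BRIGHTNESS_LEVELS_HIGH[value])
--         if pending == 6:  # buffer is now a whole number of groups: one more
--             value = buf & 0x7F
--             if value < len(BRIGHTNESS_LEVELS_HIGH):
--                 result.append(BRIGHTNESS_LEVELS_HIGH[value])
--     return ''.join(result)
-- ===== Notes on version B (the rewrite author's own statement) =====
-- stated objective: alternative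
-- what changed: Replaces A's streaming bit_buffer/bit_count state with its nested while-drain loop by a single enumerate-driven pass: since every byte completes exactly one 7-bit group (two on every seventh byte), B computes each group's shift directly from the byte index and the bit_count state and inner loop disappear.
import Mathlib
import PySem

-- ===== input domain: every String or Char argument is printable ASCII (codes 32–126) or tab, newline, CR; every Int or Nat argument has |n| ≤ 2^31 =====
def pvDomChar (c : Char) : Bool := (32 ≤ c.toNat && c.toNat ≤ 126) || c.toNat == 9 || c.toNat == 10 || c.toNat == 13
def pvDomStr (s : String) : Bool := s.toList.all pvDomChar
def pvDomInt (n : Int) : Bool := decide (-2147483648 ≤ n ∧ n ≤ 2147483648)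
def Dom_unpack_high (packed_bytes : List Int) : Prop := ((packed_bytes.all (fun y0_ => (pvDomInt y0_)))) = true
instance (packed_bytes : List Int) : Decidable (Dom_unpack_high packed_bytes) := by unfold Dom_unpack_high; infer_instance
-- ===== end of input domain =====

-- B removes A's bit_count state and inner while-drain loop: since every byte completes
-- exactly one 7-bit group (two on every seventh byte), B emits per byte driven by the
-- index alone (alternative decomposition, same cost); equal return value on all inputs.

-- the module constant; its 113 characters (Python len counts code points)
def pyBL : List Char := "          .-':_,^=;><+!rc*/z?sLTv)J7(|F{C}fI31tlu[neoZ5Yxya]2ESwqkP6h9d4VpOGbUAKXHm8RD#$Bg0MNWQ%&@██████████████\n".toList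

-- ===== PORT A =====
-- the inner 'while bit_count >= 7' loop; BRIGHTNESS_LEVELS_HIGH[value] is pyBL.getD, exact
-- because the guard gives 0 ≤ value < len (value = buf & 0x7F); cnt - 7 ≥ 0 so .toNat is exact
def drainA (buf : Int) (cnt : Int) (res : List Char) : Int × List Char :=
  if h : 7 ≤ cnt then
    let value := PySem.Int.band (buf >>> (cnt - 7).toNat) 0x7F
    let res' := if value < (pyBL.length : Int) then res ++ [pyBL.getD value.toNat ' '] else res
    drainA buf (cnt - 7) res'
  else (cnt, res)
termination_by cnt.toNat
decreasing_by omega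

def unpack_high (packed_bytes : List Int) : String :=
  let fin := packed_bytes.foldl (fun (st : Int × Int × List Char) byte =>
    let buf := PySem.Int.bor (st.1 <<< (8 : Nat)) byte
    let d := drainA buf (st.2.1 + 8) st.2.2
    (buf, d.1, d.2)) (0, 0, [])
  String.ofList fin.2.2

-- ===== PORT B =====
-- enumerate index i ≥ 0, so pending = i % 7 ∈ [0,6] and the shifts pending+1 are
-- nonnegative: .toNat is exact
def unpack_high_alt (packed_bytes : List Int) : String :=
  let fin := (PySem.List.enumerate packed_bytes).foldl
    (fun (st : Int × List Char) (p : Int × Int) =>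
      let buf := PySem.Int.bor (st.1 <<< (8 : Nat)) p.2
      let pending := PySem.Int.mod p.1 7
      let value := PySem.Int.band (buf >>> (pending + 1).toNat) 0x7F
      let res := if value < (pyBL.length : Int) then st.2 ++ [pyBL.getD value.toNat ' '] else st.2
      let res2 :=
        if pending == 6 then
          let value2 := PySem.Int.band buf 0x7F
          if value2 < (pyBL.length : Int) then res ++ [pyBL.getD value2.toNat ' '] else res
        else res
      (buf, res2)) (0, [])
  String.ofList fin.2

-- ===== PRECONDITION & SPEC =====
def Spec_unpack_high (packed_bytes : List Int) (out : String) : Prop := out = unpack_high_alt packed_bytes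
instance (packed_bytes : List Int) (out : String) : Decidable (Spec_unpack_high packed_bytes out) := by unfold Spec_unpack_high; infer_instance

-- ===== CLAIM (what is proved, stated in full; the proofs are below) =====
def Claim_equal_unpack_high : Prop := ∀ (packed_bytes : List Int), Dom_unpack_high packed_bytes → Spec_unpack_high packed_bytes (unpack_high packed_bytes)

-- ===== LEMMAS AND PROOFS =====

-- common vocabulary: running buffer, emitted chunk, and the position of the j-th 7-bit group
def mixI (a b : Int) : Int := PySem.Int.bor (a <<< (8 : Nat)) b
def bufOf (bs : List Int) : Int := bs.foldl mixI 0
def emitC (v : Int) : List Char := if v < (pyBL.length : Int) then [pyBL.getD v.toNat ' '] else []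
def idxOf (j : Nat) : Nat := (7 * (j + 1) + 7) / 8 - 1
def valOf (bs : List Int) (j : Nat) : Int :=
  PySem.Int.band (bufOf (bs.take (idxOf j + 1)) >>> (8 * (idxOf j + 1) - 7 * (j + 1))) 127
def outOf (bs : List Int) : List Char :=
  (List.range (8 * bs.length / 7)).flatMap (fun j => emitC (valOf bs j))

lemma drain_stop (buf cnt : Int) (res : List Char) (h : cnt < 7) :
    drainA buf cnt res = (cnt, res) := by
  unfold drainA; rw [dif_neg (by omega)]

lemma append_emit (res : List Char) (v : Int) :
    (if v < (pyBL.length : Int) then res ++ [pyBL.getD v.toNat ' '] else res) = res ++ emitC v := by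
  unfold emitC
  split
  · rfl
  · exact res.append_nil.symm

lemma drain_unfold (buf cnt : Int) (res : List Char) (h7 : 7 ≤ cnt) :
    drainA buf cnt res
      = drainA buf (cnt - 7) (res ++ emitC (PySem.Int.band (buf >>> (cnt - 7).toNat) 127)) := by
  conv_lhs => rw [drainA]
  rw [dif_pos h7]
  simp only
  rw [append_emit]

lemma drain_once (buf cnt : Int) (res : List Char) (h7 : 7 ≤ cnt) (h14 : cnt < 14) :
    drainA buf cnt res = (cnt - 7, res ++ emitC (PySem.Int.band (buf >>> (cnt - 7).toNat) 127)) := by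
  rw [drain_unfold _ _ _ h7, drain_stop _ _ _ (by omega)]

lemma drain_twice (buf : Int) (res : List Char) :
    drainA buf 14 res
      = ((0:Int), res ++ emitC (PySem.Int.band (buf >>> (7:Nat)) 127) ++ emitC (PySem.Int.band buf 127)) := by
  rw [drain_unfold _ _ _ (by norm_num), drain_unfold _ _ _ (by norm_num),
    drain_stop _ _ _ (by norm_num)]
  norm_num
  rfl

lemma eight7 (a : Nat) : 8 * a / 7 = a + a / 7 := by omega

lemma idxOf_lt (i j : Nat) (hj : j < 8 * i / 7) : idxOf j < i := by
  have h1 := eight7 i; unfold idxOf; omega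

lemma valOf_append (bs : List Int) (b : Int) (j : Nat) (hj : j < 8 * bs.length / 7) :
    valOf (bs ++ [b]) j = valOf bs j := by
  have h := idxOf_lt bs.length j hj
  unfold valOf
  rw [List.take_append_of_le_length (by omega)]

lemma idxOf_newA (i : Nat) : idxOf (8 * i / 7) = i := by
  have h1 := eight7 i; unfold idxOf; omega

lemma idxOf_newB (i : Nat) (h6 : i % 7 = 6) : idxOf (8 * i / 7 + 1) = i := by
  have h1 := eight7 i; unfold idxOf; omega

lemma take_full (bs : List Int) (b : Int) : (bs ++ [b]).take (bs.length + 1) = bs ++ [b] := by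
  simp

lemma outOf_append (bs : List Int) (b : Int) :
    outOf (bs ++ [b])
      = outOf bs ++
        (if bs.length % 7 = 6 then
          emitC (PySem.Int.band (bufOf (bs ++ [b]) >>> (bs.length % 7 + 1)) 127)
            ++ emitC (PySem.Int.band (bufOf (bs ++ [b])) 127)
        else emitC (PySem.Int.band (bufOf (bs ++ [b]) >>> (bs.length % 7 + 1)) 127)) := by
  have hlen : (bs ++ [b]).length = bs.length + 1 := by simp
  have hvA : valOf (bs ++ [b]) (8 * bs.length / 7)
      = PySem.Int.band (bufOf (bs ++ [b]) >>> (bs.length % 7 + 1)) 127 := by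
    unfold valOf
    rw [idxOf_newA, take_full]
    congr 2
    have h1 := eight7 bs.length
    omega
  by_cases h6 : bs.length % 7 = 6
  · have hm2 : 8 * ((bs ++ [b]).length) / 7 = 8 * bs.length / 7 + 2 := by
      have h1 := eight7 bs.length; have h2 := eight7 (bs.length + 1); omega
    have hvB : valOf (bs ++ [b]) (8 * bs.length / 7 + 1) = PySem.Int.band (bufOf (bs ++ [b])) 127 := by
      unfold valOf
      rw [idxOf_newB bs.length h6, take_full]
      have h0 : 8 * (bs.length + 1) - 7 * (8 * bs.length / 7 + 1 + 1) = 0 := by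
        have h1 := eight7 bs.length
        omega
      rw [h0]
      simp
    rw [if_pos h6]
    unfold outOf
    rw [hm2, show 8 * bs.length / 7 + 2 = (8 * bs.length / 7 + 1) + 1 from rfl, List.range_succ,
      List.range_succ, List.flatMap_append, List.flatMap_append]
    simp only [List.flatMap_cons, List.flatMap_nil, List.append_nil]
    rw [hvA, hvB, List.append_assoc]
    congr 1
    unfold List.flatMap
    congr 1
    exact List.map_congr_left (fun j hj => by
      rw [valOf_append bs b j (List.mem_range.mp hj)])
  · have hm1 : 8 * ((bs ++ [b]).length) / 7 = 8 * bs.length / 7 + 1 := by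
      have h1 := eight7 bs.length; have h2 := eight7 (bs.length + 1); omega
    rw [if_neg h6]
    unfold outOf
    rw [hm1, List.range_succ, List.flatMap_append]
    simp only [List.flatMap_cons, List.flatMap_nil, List.append_nil]
    rw [hvA]
    congr 1
    unfold List.flatMap
    congr 1
    exact List.map_congr_left (fun j hj => by
      rw [valOf_append bs b j (List.mem_range.mp hj)])

-- A's fold state after the whole list: buffer, bit_count = len % 7, output so far
lemma foldA_eq (bs : List Int) :
    bs.foldl (fun (st : Int × Int × List Char) byte =>
      let buf := PySem.Int.bor (st.1 <<< (8 : Nat)) byte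
      let d := drainA buf (st.2.1 + 8) st.2.2
      (buf, d.1, d.2)) (0, 0, [])
    = (bufOf bs, ((bs.length % 7 : Nat) : Int), outOf bs) := by
  induction bs using List.reverseRecOn with
  | nil => simp [bufOf, outOf]
  | append_singleton bs b ih =>
    rw [List.foldl_append, ih]
    simp only [List.foldl_cons, List.foldl_nil]
    have hbuf : bufOf (bs ++ [b]) = PySem.Int.bor (bufOf bs <<< (8 : Nat)) b := by
      simp [bufOf, mixI]
    rw [outOf_append]
    have hlen : (bs ++ [b]).length = bs.length + 1 := by simp
    by_cases h6 : bs.length % 7 = 6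
    · rw [if_pos h6, h6]
      have h14 : ((6 : Nat) : Int) + 8 = 14 := by norm_num
      rw [h14, drain_twice]
      simp only [Prod.mk.injEq]
      refine ⟨hbuf.symm, ?_, ?_⟩
      · omega
      · rw [hbuf]
        norm_num
    · rw [if_neg h6]
      rw [drain_once _ _ _ (by omega) (by omega)]
      simp only [Prod.mk.injEq]
      refine ⟨hbuf.symm, ?_, ?_⟩
      · omega
      · rw [hbuf]
        have hsh : ((↑(bs.length % 7) : Int) + 8 - 7).toNat = bs.length % 7 + 1 := by omega
        rw [hsh]

lemma unpack_high_eq_outOf (bs : List Int) : unpack_high bs = String.ofList (outOf bs) := by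
  unfold unpack_high
  rw [foldA_eq]

-- enumerate of a snoc, with general start
lemma enumerate_snoc (bs : List Int) (b : Int) (s : Int) :
    PySem.List.enumerate (bs ++ [b]) s
      = PySem.List.enumerate bs s ++ [(s + bs.length, b)] := by
  induction bs generalizing s with
  | nil => simp [PySem.List.enumerate_cons, PySem.List.enumerate_nil]
  | cons x xs ih =>
    rw [List.cons_append, PySem.List.enumerate_cons, PySem.List.enumerate_cons, ih]
    have h : s + 1 + (xs.length : Int) = s + ((x :: xs).length : Int) := by
      push_cast [List.length_cons]
      ring
    rw [h, List.cons_append]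

-- B's fold state after the whole list: buffer and output so far
lemma foldB_eq (bs : List Int) :
    (PySem.List.enumerate bs).foldl
      (fun (st : Int × List Char) (p : Int × Int) =>
        let buf := PySem.Int.bor (st.1 <<< (8 : Nat)) p.2
        let pending := PySem.Int.mod p.1 7
        let value := PySem.Int.band (buf >>> (pending + 1).toNat) 0x7F
        let res := if value < (pyBL.length : Int) then st.2 ++ [pyBL.getD value.toNat ' '] else st.2
        let res2 :=
          if pending == 6 then
            let value2 := PySem.Int.band buf 0x7F
            if value2 < (pyBL.length : Int) then res ++ [pyBL.getD value2.toNat ' '] else res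
          else res
        (buf, res2)) (0, [])
    = (bufOf bs, outOf bs) := by
  induction bs using List.reverseRecOn with
  | nil =>
    simp only [PySem.List.enumerate_nil, List.foldl_nil]
    rfl
  | append_singleton bs b ih =>
    rw [enumerate_snoc, List.foldl_append, ih]
    simp only [List.foldl_cons, List.foldl_nil]
    have hbuf : bufOf (bs ++ [b]) = PySem.Int.bor (bufOf bs <<< (8 : Nat)) b := by
      simp [bufOf, mixI]
    have hmod : PySem.Int.mod ((0 : Int) + (bs.length : Int)) 7 = ((bs.length % 7 : Nat) : Int) := by
      rw [PySem.Int.mod_eq_emod_of_pos (by norm_num : (0:Int) < 7)]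
      omega
    rw [outOf_append, hbuf]
    simp only [hmod]
    by_cases h6 : bs.length % 7 = 6
    · rw [if_pos h6, h6]
      simp only [Nat.cast_ofNat]
      have hsh : (((6 : Nat) : Int) + 1).toNat = 7 := by decide
      rw [Prod.mk.injEq]
      refine ⟨rfl, ?_⟩
      rw [append_emit, append_emit]
      norm_num [h6]
      rfl
    · rw [if_neg h6]
      have hbeq : (((bs.length % 7 : Nat) : Int) == (6 : Int)) = false := by
        simp; omega
      simp only [hbeq, if_false, Bool.false_eq_true]
      rw [Prod.mk.injEq]
      refine ⟨rfl, ?_⟩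
      rw [append_emit]
      have hsh : (((bs.length % 7 : Nat) : Int) + 1).toNat = bs.length % 7 + 1 := by omega
      rw [hsh]

lemma unpack_high_alt_eq_outOf (bs : List Int) : unpack_high_alt bs = String.ofList (outOf bs) := by
  unfold unpack_high_alt
  rw [foldB_eq]

-- ===== VERDICT =====
theorem unpack_high_spec : Claim_equal_unpack_high := by
  intro bs _
  unfold Spec_unpack_high
  rw [unpack_high_eq_outOf, unpack_high_alt_eq_outOf]
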